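-- pv_equiv track=rewrite | github.com/jwestfield95/python_project_westfield | automated.py | observed_substrings
-- ===== SOURCE A (Python) =====
-- def observed_substrings(string_of_letters,k):#function to get observed substrings
--     '''input is a string of letters and k value
--     returns number of unique observed substrings'''
--     for letter in string_of_letters:
--         assert letter in ["A","T","C","G"],'letters of desired alphabet'
--     all_substrings= [string_of_letters[i:i+(k)] for i in range(0,len(string_of_letters),1)]
--     for i in range(0,len(all_substrings)):
--         if(len(all_substrings) ==k):
--             all_substrings.pop()
--     newlst=[]
--     for item in all_substrings:
--         if len(item) ==k:
--             newlst.append(item)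
--     unique_set=set(newlst)
--     unique_list=list([unique_set])
--     for x in unique_list:
--         return (len(x))
-- ===== SOURCE B (Python) =====
-- def observed_substrings(string_of_letters, k):
--     '''input is a string of letters and k value
--     returns number of unique observed substrings'''
--     for letter in string_of_letters:
--         assert letter in ["A", "T", "C", "G"], 'letters of desired alphabet'
--     slices = [string_of_letters[i:i + k]
--               for i in range(len(string_of_letters))
--               if len(string_of_letters[i:i + k]) == k]
--     slices.sort()
--     count = 0
--     for i in range(len(slices)):
--         if i == 0 or slices[i] != slices[i - 1]:
--             count += 1
--     return count
-- ===== Notes on version B (the rewrite author's own statement) =====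
-- stated objective: alternative
-- what changed: Replaces A's build-all-slices / conditional-pop / filter / set pipeline by collecting the valid length-k slices, sorting them, and counting adjacent changes in one indexed pass over the sorted list.
-- intended difference: On one-letter strings with k = 1, A's 'pop when len(list)==k' loop discards the only length-1 substring so A returns 0, while B returns 1, the intended count of distinct length-1 substrings. — e.g. on observed_substrings("A", 1): A returns 0, B returns 1
import Mathlib
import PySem

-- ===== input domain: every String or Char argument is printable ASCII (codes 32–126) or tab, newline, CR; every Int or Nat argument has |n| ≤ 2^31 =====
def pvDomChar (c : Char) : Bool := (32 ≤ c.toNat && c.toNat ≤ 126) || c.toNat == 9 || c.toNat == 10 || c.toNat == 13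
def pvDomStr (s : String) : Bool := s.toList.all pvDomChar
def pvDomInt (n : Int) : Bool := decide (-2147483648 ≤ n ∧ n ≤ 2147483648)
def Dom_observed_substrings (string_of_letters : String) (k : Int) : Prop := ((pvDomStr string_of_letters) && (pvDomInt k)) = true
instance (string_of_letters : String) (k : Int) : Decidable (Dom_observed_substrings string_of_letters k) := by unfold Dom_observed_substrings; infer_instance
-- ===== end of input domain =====

-- B replaces A's list-build / conditional-pop / filter / set pipeline by collecting the valid
-- slices, sorting them, and counting adjacent changes in one indexed pass ('alternative', not faster);
-- on the one-letter input with k = 1 A's pop discards the only substring and B returns the intended 1 (see D_).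

-- ===== PORT A =====
-- the alphabet assertion loop raises outside Pre_observed_substrings and is a no-op inside it
def observed_substrings (string_of_letters : String) (k : Int) : Int :=
  let all_substrings : List String :=
    (PySem.List.pyRange 0 (PySem.Str.len string_of_letters) 1).map
      (fun i => PySem.Str.slice string_of_letters (some i) (some (i + k)))
  -- for i in range(len(all_substrings)): if len==k: pop()  — list.pop() on a nonempty list is
  -- dropLast; the branch only ever fires with the list nonempty (the condition can hold at most
  -- once, on the initial list whose length is positive whenever the loop runs), so this is exact
  let popped : List String :=
    (PySem.List.pyRange 0 (all_substrings.length : Int) 1).foldl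
      (fun lst _ => if (lst.length : Int) = k then lst.dropLast else lst) all_substrings
  let newlst : List String := popped.filter (fun item => decide (PySem.Str.len item = k))
  -- unique_list = [set(newlst)]; the loop returns len of that single set
  PySem.Set.len (PySem.Set.ofList newlst)

-- ===== PORT B =====
def observed_substrings_alt (string_of_letters : String) (k : Int) : Int :=
  let slices : List String :=
    ((PySem.List.pyRange 0 (PySem.Str.len string_of_letters) 1).map
      (fun i => PySem.Str.slice string_of_letters (some i) (some (i + k)))).filter
      (fun t => decide (PySem.Str.len t = k))
  let ss : List String := PySem.List.sorted slices (fun x => x) false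
  (PySem.List.pyRange 0 (ss.length : Int) 1).foldl
    (fun count i =>
      if i = 0 ∨ PySem.List.pyGetD ss i "" ≠ PySem.List.pyGetD ss (i - 1) "" then count + 1
      else count) 0

-- ===== PRECONDITION & SPEC =====
-- A asserts every letter is A/T/C/G and raises AssertionError otherwise; Pre_ admits exactly the strings it accepts
def Pre_observed_substrings (string_of_letters : String) (k : Int) : Prop :=
  (string_of_letters.toList.all (fun c => c == 'A' || c == 'T' || c == 'C' || c == 'G')) = true
instance (string_of_letters : String) (k : Int) : Decidable (Pre_observed_substrings string_of_letters k) := by unfold Pre_observed_substrings; infer_instance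
def pvWitness_observed_substrings : String × Int := ("ATG", 2)

-- On one-letter strings with k = 1, A's 'pop when len(list)==k' loop discards the only length-1
-- substring and A returns 0, while B returns the intended count 1 of distinct length-1 substrings.
def D_observed_substrings (string_of_letters : String) (k : Int) : Prop :=
  string_of_letters.toList.length = 1 ∧ k = 1
instance (string_of_letters : String) (k : Int) : Decidable (D_observed_substrings string_of_letters k) := by unfold D_observed_substrings; infer_instance

def Spec_observed_substrings (string_of_letters : String) (k : Int) (out : Int) : Prop :=
  ¬ D_observed_substrings string_of_letters k → out = observed_substrings_alt string_of_letters k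
instance (string_of_letters : String) (k : Int) (out : Int) : Decidable (Spec_observed_substrings string_of_letters k out) := by unfold Spec_observed_substrings; infer_instance

def pvDiffWitness_observed_substrings : String × Int := ("A", 1)
def pvDiffWitnessOut_observed_substrings : Int × Int := (0, 1)

-- ===== CLAIM (what is proved, stated in full; the proofs are below) =====
def Claim_unchanged_observed_substrings : Prop := ∀ (string_of_letters : String) (k : Int), Dom_observed_substrings string_of_letters k → Pre_observed_substrings string_of_letters k → Spec_observed_substrings string_of_letters k (observed_substrings string_of_letters k)
def Claim_changed_observed_substrings : Prop := Dom_observed_substrings (pvDiffWitness_observed_substrings.1) (pvDiffWitness_observed_substrings.2) ∧ Pre_observed_substrings (pvDiffWitness_observed_substrings.1) (pvDiffWitness_observed_substrings.2) ∧ D_observed_substrings (pvDiffWitness_observed_substrings.1) (pvDiffWitness_observed_substrings.2) ∧ observed_substrings (pvDiffWitness_observed_substrings.1) (pvDiffWitness_observed_substrings.2) = pvDiffWitnessOut_observed_substrings.1 ∧ observed_substrings_alt (pvDiffWitness_observed_substrings.1) (pvDiffWitness_observed_substrings.2) = pvDiffWitnessOut_observed_substrings.2 ∧ pvDiffWitnessOut_observed_substrings.1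 ≠ pvDiffWitnessOut_observed_substrings.2
def Claim_exact_observed_substrings : Prop := ∀ (string_of_letters : String) (k : Int), Dom_observed_substrings string_of_letters k → Pre_observed_substrings string_of_letters k → D_observed_substrings string_of_letters k → observed_substrings string_of_letters k ≠ observed_substrings_alt string_of_letters k

-- ===== LEMMAS AND PROOFS =====

-- the slice list both ports build, and its length-k filter
def pvMapList (s : String) (k : Int) : List String :=
  (PySem.List.pyRange 0 (PySem.Str.len s) 1).map
    (fun i => PySem.Str.slice s (some i) (some (i + k)))
def pvL (s : String) (k : Int) : List String :=
  (pvMapList s k).filter (fun t => decide (PySem.Str.len t = k))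

-- A's pop loop is the identity when the length never equals k
theorem pvPopNoop (k : Int) (r : List Int) (lst : List String) (h : (lst.length : Int) ≠ k) :
    r.foldl (fun lst _ => if (lst.length : Int) = k then lst.dropLast else lst) lst = lst := by
  induction r with
  | nil => rfl
  | cons a t ih => simp [List.foldl_cons, if_neg h, ih]

-- A's pop loop pops exactly once, iff the initial length equals k
theorem pvPopEval (k : Int) (all : List String) :
    (PySem.List.pyRange 0 (all.length : Int) 1).foldl
      (fun lst _ => if (lst.length : Int) = k then lst.dropLast else lst) all
      = if (all.length : Int) = k then all.dropLast else all := by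
  by_cases h : (all.length : Int) = k
  · rw [if_pos h]
    cases all with
    | nil => simp [PySem.List.pyRange_one_eq_nil]
    | cons x t =>
      have hlt : (0 : Int) < ((x :: t).length : Int) := by
        simp
      rw [PySem.List.pyRange_one_cons hlt, List.foldl_cons, if_pos h]
      apply pvPopNoop
      rw [← h]
      simp [List.length_dropLast]
  · rw [if_neg h, pvPopNoop k _ _ h]

-- counting adjacent changes against the shifted list
def pvAdjNe : String → List String → Nat
  | _, [] => 0
  | p, y :: r => (if y ≠ p then 1 else 0) + pvAdjNe y r

theorem pvCountAdj (t : List String) (p : String) :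
    (List.range t.length).countP
        (fun j => decide (t.getD j "" ≠ (p :: t).getD j "")) = pvAdjNe p t := by
  induction t generalizing p with
  | nil => rfl
  | cons y r ih =>
    rw [List.length_cons, List.range_succ_eq_map, List.countP_cons, List.countP_map]
    have h0 : (List.countP
        ((fun j => decide ((y :: r).getD j "" ≠ (p :: y :: r).getD j "")) ∘ Nat.succ)
        (List.range r.length))
        = (List.range r.length).countP (fun j => decide (r.getD j "" ≠ (y :: r).getD j "")) := by
      apply List.countP_congr
      intro j _
      simp [Function.comp]
    rw [h0, ih]
    simp [pvAdjNe]
    by_cases hy : y = p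
    · simp [hy]
    · simp [hy]
      omega

-- on a ≤-sorted nonempty list, 1 + adjacent changes = number of distinct elements
theorem pvSortedCard (t : List String) (x : String)
    (hp : (x :: t).Pairwise (· ≤ ·)) :
    1 + pvAdjNe x t = (x :: t).toFinset.card := by
  induction t generalizing x with
  | nil => simp [pvAdjNe]
  | cons y r ih =>
    have hp' : (y :: r).Pairwise (· ≤ ·) := hp.tail
    have ihy := ih y hp'
    by_cases hxy : y = x
    · subst hxy
      have : (y :: y :: r).toFinset = (y :: r).toFinset := by
        simp [List.toFinset_cons]
      rw [this, ← ihy]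
      simp [pvAdjNe]
    · have hxle : ∀ z ∈ y :: r, x ≤ z := by
        intro z hz
        exact (List.pairwise_cons.mp hp).1 z hz
      have hyle : ∀ z ∈ r, y ≤ z := (List.pairwise_cons.mp hp').1
      have hnx : x ∉ (y :: r) := by
        intro hx
        rcases List.mem_cons.mp hx with h | h
        · exact hxy h.symm
        · have h1 : x ≤ y := hxle y (List.mem_cons_self)
          have h2 : y ≤ x := hyle x h
          exact hxy (le_antisymm h2 h1)
      have : (x :: y :: r).toFinset = insert x (y :: r).toFinset := by
        simp [List.toFinset_cons]
      rw [this, Finset.card_insert_of_notMem (by simpa using hnx), ← ihy]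
      simp [pvAdjNe, hxy]
      omega

-- B's indexed pass over the sorted list counts the distinct elements of L
theorem pvAltEq (s : String) (k : Int) :
    observed_substrings_alt s k = ((pvL s k).toFinset.card : Int) := by
  simp only [observed_substrings_alt]
  rw [show ((PySem.List.pyRange 0 (PySem.Str.len s) 1).map
      (fun i => PySem.Str.slice s (some i) (some (i + k)))).filter
      (fun t => decide (PySem.Str.len t = k)) = pvL s k from rfl]
  set ss := PySem.List.sorted (pvL s k) (fun x => x) false with hss
  have hfin : ss.toFinset = (pvL s k).toFinset := by
    ext z
    rw [List.mem_toFinset, List.mem_toFinset, hss, PySem.List.mem_sorted]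
  have hpair : ss.Pairwise (· ≤ ·) := by
    simpa using PySem.List.sorted_pairwise (pvL s k) (fun x => x)
  rw [PySem.List.foldl_ite_add_one
    (fun i => i = 0 ∨ PySem.List.pyGetD ss i "" ≠ PySem.List.pyGetD ss (i - 1) "")]
  rw [zero_add, ← hfin]
  refine congrArg Nat.cast ?_
  rw [PySem.List.pyRange_one, List.countP_map]
  cases hs : ss with
  | nil => simp
  | cons x t =>
    simp only [List.length_cons]
    have hlen1 : (((t.length + 1 : ℕ) : Int) - 0).toNat = t.length + 1 := by omega
    rw [hlen1, List.range_succ_eq_map, List.countP_cons, List.countP_map]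
    have h0 : (List.countP
        (((fun i => decide (i = 0 ∨ PySem.List.pyGetD (x :: t) i "" ≠ PySem.List.pyGetD (x :: t) (i - 1) ""))
          ∘ fun j : ℕ => (0 : Int) + ↑j) ∘ Nat.succ) (List.range t.length))
        = (List.range t.length).countP
            (fun j => decide (t.getD j "" ≠ (x :: t).getD j "")) := by
      apply List.countP_congr
      intro j _
      have hj1 : ((0 : Int) + ((j + 1 : ℕ) : Int)) = ((j + 1 : ℕ) : Int) := by push_cast; ring
      have hj2 : (((j + 1 : ℕ) : Int) - 1) = ((j : ℕ) : Int) := by push_cast; ring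
      simp only [Function.comp, hj1, hj2, PySem.List.pyGetD_natCast]
      simp
      intro hh
      exact absurd hh (by omega)
    have hx0 : (((fun i => decide (i = 0 ∨ PySem.List.pyGetD (x :: t) i "" ≠ PySem.List.pyGetD (x :: t) (i - 1) ""))
        ∘ fun j : ℕ => (0 : Int) + ↑j) 0) = true := by simp
    rw [h0, pvCountAdj, hx0]
    have := pvSortedCard t x (hs ▸ hpair)
    simp only [if_true]
    omega

-- A computes the distinct count of its filtered, possibly popped list
theorem pvAEq (s : String) (k : Int) :
    observed_substrings s k =
      (((if ((pvMapList s k).length : Int) = k then (pvMapList s k).dropLast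
         else pvMapList s k).filter
        (fun t => decide (PySem.Str.len t = k))).toFinset.card : Int) := by
  simp only [observed_substrings]
  rw [show (PySem.List.pyRange 0 (PySem.Str.len s) 1).map
      (fun i => PySem.Str.slice s (some i) (some (i + k))) = pvMapList s k from rfl]
  rw [pvPopEval]
  set L := (if ((pvMapList s k).length : Int) = k then (pvMapList s k).dropLast
    else pvMapList s k).filter (fun t => decide (PySem.Str.len t = k))
  have hnd : (PySem.Set.ofList L).Nodup := PySem.Set.nodup_ofList L
  have hfin : (PySem.Set.ofList L).toFinset = L.toFinset := by
    ext z; simp [List.mem_toFinset, PySem.Set.mem_ofList]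
  have := List.toFinset_card_of_nodup hnd
  rw [hfin] at this
  simp [PySem.Set.len, ← this]

-- length of the i-th slice
theorem pvSliceLen (s : String) (k : Int) (i : Int) :
    PySem.Str.len (PySem.Str.slice s (some i) (some (i + k)))
      = ((PySem.List.clampIdx s.toList.length (i + k)
          - PySem.List.clampIdx s.toList.length i : ℕ) : Int) := by
  rw [PySem.Str.len_eq, PySem.Str.toList_slice]
  have h : PySem.Chars.slice s.toList (some i) (some (i + k))
      = PySem.List.slice s.toList (some i) (some (i + k)) := rfl
  rw [h, PySem.List.length_slice]

-- outside D_, the element A pops (when it pops) never survives the length-k filter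
theorem pvFilterEq (s : String) (k : Int) (hD : ¬ D_observed_substrings s k) :
    ((if ((pvMapList s k).length : Int) = k then (pvMapList s k).dropLast
      else pvMapList s k).filter (fun t => decide (PySem.Str.len t = k))) = pvL s k := by
  by_cases h : ((pvMapList s k).length : Int) = k
  · rw [if_pos h]
    unfold pvL
    have hlen : (pvMapList s k).length = s.toList.length := by
      unfold pvMapList
      rw [List.length_map, PySem.List.pyRange_one, List.length_map, List.length_range,
        PySem.Str.len_eq]
      simp
    cases hn : s.toList.length with
    | zero =>
      have : pvMapList s k = [] := by
        apply List.eq_nil_of_length_eq_zero; omega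
      simp [this]
    | succ m =>
      -- n >= 1 and k = n; the popped last slice has length 1, and 1 != k since not (n = 1 and k = 1)
      have hk : k = ((m + 1 : ℕ) : Int) := by omega
      have hm : m ≠ 0 := by
        intro hm0
        exact hD ⟨by omega, by omega⟩
      have hrepr : pvMapList s k
          = (List.range (m + 1)).map
              (fun (j : ℕ) => PySem.Str.slice s (some (j : Int)) (some ((j : Int) + k))) := by
        unfold pvMapList
        rw [PySem.List.pyRange_one]
        have h1 : ((PySem.Str.len s) - 0).toNat = m + 1 := by
          rw [PySem.Str.len_eq, hn]; simp
        rw [h1, List.map_map]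
        apply List.map_congr_left
        intro j _
        simp [Function.comp]
      have hsplit : pvMapList s k
          = ((List.range m).map
              (fun (j : ℕ) => PySem.Str.slice s (some (j : Int)) (some ((j : Int) + k))))
            ++ [PySem.Str.slice s (some ((m : ℕ) : Int)) (some (((m : ℕ) : Int) + k))] := by
        rw [hrepr, List.range_succ, List.map_append]
        rfl
      have hdrop : (pvMapList s k).dropLast
          = (List.range m).map
              (fun (j : ℕ) => PySem.Str.slice s (some (j : Int)) (some ((j : Int) + k))) := by
        rw [hsplit, List.dropLast_concat]
      have hlastlen :
          PySem.Str.len (PySem.Str.slice s (some ((m : ℕ) : Int)) (some (((m : ℕ) : Int) + k))) = 1 := by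
        rw [pvSliceLen]
        have hc1 : PySem.List.clampIdx s.toList.length ((m : ℕ) : Int) = m := by
          rw [PySem.List.clampIdx_natCast]; omega
        have hc2 : PySem.List.clampIdx s.toList.length (((m : ℕ) : Int) + k) = m + 1 := by
          have h2 : (((m : ℕ) : Int) + k) = (((2 * m + 1 : ℕ) : Int)) := by push_cast; omega
          rw [h2, PySem.List.clampIdx_natCast]
          omega
        rw [hc1, hc2]
        simp
      have hfl : (List.filter (fun t => decide (PySem.Str.len t = k))
          [PySem.Str.slice s (some ((m : ℕ) : Int)) (some (((m : ℕ) : Int) + k))]) = [] := by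
        rw [List.filter_cons]
        rw [hlastlen]
        have : ¬ ((1 : Int) = k) := by omega
        simp [this]
      rw [hdrop]
      conv_rhs => rw [hsplit]
      rw [List.filter_append, hfl, List.append_nil]
  · rw [if_neg h]; rfl

set_option maxRecDepth 8192 in
theorem pv_exact_case (s : String) (k : Int) (hpre : Pre_observed_substrings s k)
    (hD : D_observed_substrings s k) :
    observed_substrings s k = 0 ∧ observed_substrings_alt s k = 1 := by
  obtain ⟨hlen, hk⟩ := hD
  obtain ⟨c, hc⟩ := List.length_eq_one_iff.mp hlen
  have hs : s = String.ofList [c] := by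
    have : String.ofList s.toList = String.ofList [c] := by rw [hc]
    simpa using this
  have hcin : c = 'A' ∨ c = 'T' ∨ c = 'C' ∨ c = 'G' := by
    unfold Pre_observed_substrings at hpre
    rw [hc] at hpre
    simp at hpre; tauto
  subst hs hk
  rcases hcin with h | h | h | h <;> subst h <;> exact ⟨by decide, by decide⟩

-- ===== VERDICT (by name: the statement is the Claim_ definition above) =====
theorem observed_substrings_spec : Claim_unchanged_observed_substrings := by
  intro s k _ _ hD
  rw [pvAEq, pvFilterEq s k hD, pvAltEq]

set_option maxRecDepth 8192 in
theorem observed_substrings_changed : Claim_changed_observed_substrings := by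
  unfold Claim_changed_observed_substrings
  exact ⟨by decide, by decide, by decide, by decide, by decide, by decide⟩

theorem observed_substrings_tight : Claim_exact_observed_substrings := by
  intro s k _ hpre hD
  obtain ⟨h0, h1⟩ := pv_exact_case s k hpre hD
  rw [h0, h1]; decide
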